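-- pv_equiv track=rewrite | github.com/camwar11/AoC | src/2024/5/day5.py | inputParser1
-- ===== SOURCE A (Python) =====
-- def inputParser1(input_data):
--     rules = []
--     updates = []
--     inRulesSection = True
--     for line in input_data.splitlines():
--         if line.isspace() or line.__len__() == 0:
--             inRulesSection = False
--             continue
--         if inRulesSection:
--             rules.append([int(x) for x in line.split('|')])
--         else:
--             updates.append([int(x) for x in line.split(',')])
--     return (rules, updates)
-- ===== SOURCE B (Python) =====
-- def inputParser1(input_data):
--     lines = input_data.splitlines()
--     idx = next((i for i, l in enumerate(lines) if l.isspace() or len(l) == 0), len(lines))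
--     rules = [[int(x) for x in l.split('|')] for l in lines[:idx]]
--     updates = [[int(x) for x in l.split(',')]
--                for l in lines[idx + 1:] if not (l.isspace() or len(l) == 0)]
--     return (rules, updates)
-- ===== Notes on version B (the rewrite author's own statement) =====
-- stated objective: alternative
-- what changed: Replaces A's single stateful pass with a boolean section flag by boundary-finding (index of the first blank/whitespace-only line) followed by two slice comprehensions over lines[:idx] and lines[idx+1:].
import Mathlib
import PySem

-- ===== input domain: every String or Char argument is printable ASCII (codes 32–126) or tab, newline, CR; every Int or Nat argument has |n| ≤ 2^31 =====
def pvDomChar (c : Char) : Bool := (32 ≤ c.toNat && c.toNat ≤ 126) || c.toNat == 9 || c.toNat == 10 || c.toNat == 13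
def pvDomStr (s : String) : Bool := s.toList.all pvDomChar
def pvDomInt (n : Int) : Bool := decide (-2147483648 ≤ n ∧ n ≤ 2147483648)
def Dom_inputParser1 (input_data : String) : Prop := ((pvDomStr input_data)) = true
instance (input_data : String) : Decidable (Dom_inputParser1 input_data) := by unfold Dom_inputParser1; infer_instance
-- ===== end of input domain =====

-- B replaces A's stateful flag pass by boundary-finding plus two slice comprehensions (alternative decomposition, same cost).

-- ===== PORT A =====
-- int(x); Pre_ guarantees ofStr? = some, so getD 0 is never the default on admitted inputs
def pvInt (x : String) : Int := (PySem.Int.ofStr? x).getD 0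

-- literal transliteration of A's loop: state = (rules, updates, inRulesSection)
def inputParser1 (input_data : String) : List (List Int) × List (List Int) :=
  let st := (PySem.Str.splitlines input_data).foldl
    (fun (st : List (List Int) × List (List Int) × Bool) line =>
      if PySem.Str.strIsspace line || PySem.Str.len line == 0 then
        (st.1, st.2.1, false)
      else if st.2.2 then
        (st.1 ++ [((PySem.Str.split? line "|").getD []).map pvInt], st.2.1, st.2.2)
      else
        (st.1, st.2.1 ++ [((PySem.Str.split? line ",").getD []).map pvInt], st.2.2))
    ([], [], true)
  (st.1, st.2.1)

-- ===== PORT B =====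
def pvBlank (l : String) : Bool := PySem.Str.strIsspace l || PySem.Str.len l == 0

def inputParser1_alt (input_data : String) : List (List Int) × List (List Int) :=
  let lines := PySem.Str.splitlines input_data
  let idx := (lines.findIdx? pvBlank).getD lines.length
  ((lines.take idx).map (fun l => ((PySem.Str.split? l "|").getD []).map pvInt),
   ((lines.drop (idx + 1)).filter (fun l => !pvBlank l)).map
     (fun l => ((PySem.Str.split? l ",").getD []).map pvInt))

-- ===== PRECONDITION & SPEC =====
-- Pre_ excludes exactly the inputs where Python's int() raises ValueError: some piece of a
-- rules-section line split on the pipe separator (or of a non-blank updates-section line split on the comma separator) is not an int literal.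
def Pre_inputParser1 (input_data : String) : Prop :=
  let lines := PySem.Str.splitlines input_data
  (∀ l ∈ lines.takeWhile (fun l => !pvBlank l), ∀ x ∈ (PySem.Str.split? l "|").getD [], (PySem.Int.ofStr? x).isSome) ∧
  (∀ l ∈ lines.dropWhile (fun l => !pvBlank l), pvBlank l = false → ∀ x ∈ (PySem.Str.split? l ",").getD [], (PySem.Int.ofStr? x).isSome)
instance (input_data : String) : Decidable (Pre_inputParser1 input_data) := by unfold Pre_inputParser1; infer_instance

def pvWitness_inputParser1 : String := "1|2\n3|1\n\n1,2,3\n3,1"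

def Spec_inputParser1 (input_data : String) (out : List (List Int) × List (List Int)) : Prop := out = inputParser1_alt input_data
instance (input_data : String) (out : List (List Int) × List (List Int)) : Decidable (Spec_inputParser1 input_data out) := by unfold Spec_inputParser1; infer_instance

-- ===== CLAIM (what is proved, stated in full; the proofs are below) =====
def Claim_equal_inputParser1 : Prop := ∀ (input_data : String), Dom_inputParser1 input_data → Pre_inputParser1 input_data → Spec_inputParser1 input_data (inputParser1 input_data)

-- ===== LEMMAS AND PROOFS =====

-- the loop body of A, named for the proofs
def pvStep (st : List (List Int) × List (List Int) × Bool) (line : String) :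
    List (List Int) × List (List Int) × Bool :=
  if PySem.Str.strIsspace line || PySem.Str.len line == 0 then
    (st.1, st.2.1, false)
  else if st.2.2 then
    (st.1 ++ [((PySem.Str.split? line "|").getD []).map pvInt], st.2.1, st.2.2)
  else
    (st.1, st.2.1 ++ [((PySem.Str.split? line ",").getD []).map pvInt], st.2.2)

-- once the flag is false it stays false: the tail only filters into updates
theorem foldl_pvStep_false (ls : List String) (rs us : List (List Int)) :
    ls.foldl pvStep (rs, us, false) =
      (rs, us ++ (ls.filter (fun l => !pvBlank l)).map
        (fun l => ((PySem.Str.split? l ",").getD []).map pvInt), false) := by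
  induction ls generalizing us with
  | nil => simp
  | cons l t ih =>
      simp only [List.foldl_cons, pvStep]
      by_cases h : pvBlank l = true
      · have h' : (PySem.Str.strIsspace l || PySem.Str.len l == 0) = true := h
        rw [if_pos h', ih]
        simp [h]
      · have h' : (PySem.Str.strIsspace l || PySem.Str.len l == 0) = false := by
          simpa [pvBlank] using h
        simp only [h', Bool.false_eq_true, if_false]
        rw [ih]
        simp [h]

-- main invariant: A's fold from the rules phase equals B's boundary decomposition
theorem foldl_pvStep_true (ls : List String) (rs : List (List Int)) :
    (ls.foldl pvStep (rs, [], true)).1 =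
      rs ++ (ls.take ((ls.findIdx? pvBlank).getD ls.length)).map
        (fun l => ((PySem.Str.split? l "|").getD []).map pvInt) ∧
    (ls.foldl pvStep (rs, [], true)).2.1 =
      ((ls.drop ((ls.findIdx? pvBlank).getD ls.length + 1)).filter (fun l => !pvBlank l)).map
        (fun l => ((PySem.Str.split? l ",").getD []).map pvInt) := by
  induction ls generalizing rs with
  | nil => simp
  | cons l t ih =>
      by_cases h : pvBlank l = true
      · have h' : (PySem.Str.strIsspace l || PySem.Str.len l == 0) = true := h
        simp only [List.foldl_cons, pvStep]
        rw [if_pos h']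
        rw [foldl_pvStep_false]
        simp [List.findIdx?_cons, h]
      · have h' : (PySem.Str.strIsspace l || PySem.Str.len l == 0) = false := by
          simpa [pvBlank] using h
        simp only [List.foldl_cons, pvStep]
        simp only [h', Bool.false_eq_true, if_false]
        simp only [if_true]
        rcases ih (rs ++ [((PySem.Str.split? l "|").getD []).map pvInt]) with ⟨h1, h2⟩
        constructor
        · rw [h1]
          cases hf : t.findIdx? pvBlank with
          | none => simp [List.findIdx?_cons, h, hf]
          | some i => simp [List.findIdx?_cons, h, hf]
        · rw [h2]
          cases hf : t.findIdx? pvBlank with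
          | none => simp [List.findIdx?_cons, h, hf]
          | some i => simp [List.findIdx?_cons, h, hf]

-- ===== VERDICT (by name: the statement is the Claim_ definition above) =====
theorem inputParser1_spec : Claim_equal_inputParser1 := by
  intro input_data _ _
  unfold Spec_inputParser1 inputParser1 inputParser1_alt
  have h := foldl_pvStep_true (PySem.Str.splitlines input_data) []
  simp only [List.nil_append] at h
  exact Prod.ext h.1 h.2
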